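-- pv_equiv track=rewrite | github.com/OxQuasar/nous-memories | iching/opposition-theory/phase2/n6_equivariant.py | enumerate_size2_choices
-- ===== SOURCE A (Python) =====
-- def enumerate_size2_choices(orbit_list):
--     """
--     Enumerate all valid configurations of size-2 orbits.
--
--     Each orbit can be:
--       - self-matched: pair the two elements (1 way)
--       - linked with another orbit: 2 ways (a↔c or a↔comp(c))
--
--     Returns list of configurations, each being a list of (a,b) pairs.
--     """
--     n = len(orbit_list)
--     configs = []
--
--     def recurse(remaining_idx, pairs):
--         if not remaining_idx:
--             configs.append(pairs[:])
--             return
--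
--         first = remaining_idx[0]
--         rest = remaining_idx[1:]
--         a, ca = orbit_list[first]  # a and comp(a)
--
--         # Option 1: self-match
--         pairs.append((min(a, ca), max(a, ca)))
--         recurse(rest, pairs)
--         pairs.pop()
--
--         # Option 2: pair with another orbit
--         for i, other in enumerate(rest):
--             c, cc = orbit_list[other]
--             new_rest = rest[:i] + rest[i+1:]
--
--             # Linking 1: a↔c, comp(a)↔comp(c)
--             pairs.append((min(a, c), max(a, c)))
--             pairs.append((min(ca, cc), max(ca, cc)))
--             recurse(new_rest, pairs)
--             pairs.pop()
--             pairs.pop()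
--
--             # Linking 2: a↔comp(c), comp(a)↔c
--             pairs.append((min(a, cc), max(a, cc)))
--             pairs.append((min(ca, c), max(ca, c)))
--             recurse(new_rest, pairs)
--             pairs.pop()
--             pairs.pop()
--
--     recurse(list(range(n)), [])
--     return configs
-- ===== SOURCE B (Python) =====
-- def enumerate_size2_choices(orbit_list):
--     """Pure recursive enumeration over the orbit list itself: no index lists,
--     no shared mutable state; enum(orbits) RETURNS all pair-lists for orbits."""
--     def enum(orbits):
--         if not orbits:
--             return [[]]
--         (a, ca), rest = orbits[0], orbits[1:]
--         out = [[(min(a, ca), max(a, ca))] + tail for tail in enum(rest)]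
--         for i, (c, cc) in enumerate(rest):
--             sub = enum(rest[:i] + rest[i+1:])
--             out += [[(min(a, c), max(a, c)), (min(ca, cc), max(ca, cc))] + t for t in sub]
--             out += [[(min(a, cc), max(a, cc)), (min(ca, c), max(ca, c))] + t for t in sub]
--         return out
--     return enum(orbit_list)
-- ===== Notes on version B (the rewrite author's own statement) =====
-- stated objective: simpler
-- what changed: Replaces the index-list backtracking with shared mutable pairs/configs state by a pure recursive enum over the orbit list itself that returns the list of all configurations directly (base case [[]], prepending pairs to each recursive tail).
import Mathlib
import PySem

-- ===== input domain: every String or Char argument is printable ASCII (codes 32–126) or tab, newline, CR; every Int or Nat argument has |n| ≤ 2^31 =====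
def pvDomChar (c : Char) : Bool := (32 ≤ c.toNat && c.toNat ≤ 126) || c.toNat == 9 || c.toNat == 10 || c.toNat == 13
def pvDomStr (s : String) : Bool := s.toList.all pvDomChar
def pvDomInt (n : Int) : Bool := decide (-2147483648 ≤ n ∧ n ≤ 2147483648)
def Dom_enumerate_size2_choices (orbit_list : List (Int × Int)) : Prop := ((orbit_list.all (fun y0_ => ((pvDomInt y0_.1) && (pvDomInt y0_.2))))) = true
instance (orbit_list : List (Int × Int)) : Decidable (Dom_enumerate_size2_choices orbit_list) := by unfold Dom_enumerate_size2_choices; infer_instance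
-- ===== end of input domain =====

-- B replaces A's index-list backtracking over shared mutable pairs/configs state by a pure
-- recursive enumeration over the orbit list that returns all configurations directly (objective: simpler).

-- ===== PORT A =====
-- orbit_list[first]: the indices come from range(n) and element removal, so they are Nat
-- positions always in range; getD is exact for Python's orbit_list[i] on every reached call.
def pvGetOrb (ol : List (Int × Int)) (i : Nat) : Int × Int := ol.getD i (0, 0)

-- 'for i, other in enumerate(rest)': structural loop carrying the position i;
-- rest[:i] + rest[i+1:] = take i ++ drop (i+1) (i is a Nat position, exact).
-- 'step' is the recursive call into recurse (passed in so the loop is structural).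
def pvLoopA (ol : List (Int × Int))
    (step : List Nat → List (Int × Int) → List (List (Int × Int)) → List (List (Int × Int)))
    (a ca : Int) (rest : List Nat) (pairs : List (Int × Int)) :
    Nat → List Nat → List (List (Int × Int)) → List (List (Int × Int))
  | _, [], configs => configs
  | i, other :: tl, configs =>
      let c := (pvGetOrb ol other).1
      let cc := (pvGetOrb ol other).2
      let new_rest := rest.take i ++ rest.drop (i+1)
      let configs1 := step new_rest (pairs ++ [(min a c, max a c), (min ca cc, max ca cc)]) configs
      let configs2 := step new_rest (pairs ++ [(min a cc, max a cc), (min ca c, max ca c)]) configs1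
      pvLoopA ol step a ca rest pairs (i+1) tl configs2

-- recurse(remaining_idx, pairs): the mutable configs/pairs state is threaded explicitly;
-- 'fuel' is only a structural-termination guard (fuel ≥ remaining_idx.length on every
-- reached call, so the fuel-0 branch is unreachable; it does not change the computation).
def pvRecurseA (ol : List (Int × Int)) :
    Nat → List Nat → List (Int × Int) → List (List (Int × Int)) → List (List (Int × Int))
  | _, [], pairs, configs => configs ++ [pairs]
  | 0, _ :: _, _, configs => configs
  | f + 1, first :: rest, pairs, configs =>
      let a := (pvGetOrb ol first).1
      let ca := (pvGetOrb ol first).2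
      pvLoopA ol (pvRecurseA ol f) a ca rest pairs 0 rest
        (pvRecurseA ol f rest (pairs ++ [(min a ca, max a ca)]) configs)

def enumerate_size2_choices (orbit_list : List (Int × Int)) : List (List (Int × Int)) :=
  pvRecurseA orbit_list orbit_list.length (List.range orbit_list.length) [] []

-- ===== PORT B =====
-- 'for i, (c, cc) in enumerate(rest)' of Source B, accumulating out; 'sub' is the recursive
-- call into enum (passed in so the loop is structural).
def pvLoopB (sub : List (Int × Int) → List (List (Int × Int)))
    (a ca : Int) (rest : List (Int × Int)) :
    Nat → List (Int × Int) → List (List (Int × Int)) → List (List (Int × Int))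
  | _, [], out => out
  | i, (c, cc) :: tl, out =>
      let s := sub (rest.take i ++ rest.drop (i+1))
      pvLoopB sub a ca rest (i+1) tl
        (out ++ s.map (fun t => (min a c, max a c) :: (min ca cc, max ca cc) :: t)
             ++ s.map (fun t => (min a cc, max a cc) :: (min ca c, max ca c) :: t))

-- enum(orbits) of Source B; 'fuel' is only a structural-termination guard (fuel ≥ orbits.length
-- on every reached call, so the fuel-0 branch is unreachable).
def pvEnumB : Nat → List (Int × Int) → List (List (Int × Int))
  | _, [] => [[]]
  | 0, _ :: _ => []
  | f + 1, (a, ca) :: rest =>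
      pvLoopB (pvEnumB f) a ca rest 0 rest ((pvEnumB f rest).map (fun t => (min a ca, max a ca) :: t))

def enumerate_size2_choices_alt (orbit_list : List (Int × Int)) : List (List (Int × Int)) :=
  pvEnumB orbit_list.length orbit_list

-- ===== PRECONDITION & SPEC =====
def Spec_enumerate_size2_choices (orbit_list : List (Int × Int)) (out : List (List (Int × Int))) : Prop := out = enumerate_size2_choices_alt orbit_list
instance (orbit_list : List (Int × Int)) (out : List (List (Int × Int))) : Decidable (Spec_enumerate_size2_choices orbit_list out) := by unfold Spec_enumerate_size2_choices; infer_instance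

-- ===== CLAIM (what is proved, stated in full; the proofs are below) =====
def Claim_equal_enumerate_size2_choices : Prop := ∀ (orbit_list : List (Int × Int)), Dom_enumerate_size2_choices orbit_list → Spec_enumerate_size2_choices orbit_list (enumerate_size2_choices orbit_list)

-- ===== LEMMAS AND PROOFS =====

theorem pvLoopB_acc (sub : List (Int × Int) → List (List (Int × Int))) (a ca : Int) (rest : List (Int × Int)) (i : Nat) (tl : List (Int × Int)) (out : List (List (Int × Int))) :
    pvLoopB sub a ca rest i tl out = out ++ pvLoopB sub a ca rest i tl [] := by
  induction tl generalizing i out with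
  | nil => simp [pvLoopB]
  | cons hd tl ih =>
      obtain ⟨c, cc⟩ := hd
      rw [pvLoopB, pvLoopB]
      conv_rhs => rw [ih]
      rw [ih]
      simp [List.append_assoc]

theorem pvLoopA_eq (ol : List (Int × Int))
    (step : List Nat → List (Int × Int) → List (List (Int × Int)) → List (List (Int × Int)))
    (sub : List (Int × Int) → List (List (Int × Int)))
    (a ca : Int) (rest : List Nat) (pairs : List (Int × Int))
    (IH : ∀ idxs, idxs.length ≤ rest.length → ∀ pairs configs,
      step idxs pairs configs
        = configs ++ (sub (idxs.map (pvGetOrb ol))).map (fun t => pairs ++ t)) :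
    ∀ (tl : List Nat) (i : Nat) (configs : List (List (Int × Int))),
    pvLoopA ol step a ca rest pairs i tl configs
      = configs ++ (pvLoopB sub a ca (rest.map (pvGetOrb ol)) i (tl.map (pvGetOrb ol)) []).map (fun t => pairs ++ t) := by
  intro tl
  induction tl with
  | nil => intro i configs; simp [pvLoopA, pvLoopB]
  | cons other tl ih =>
      intro i configs
      rw [pvLoopA]
      have hlen : (rest.take i ++ rest.drop (i+1)).length ≤ rest.length := by
        simp [List.length_take]; omega
      rw [IH _ hlen, IH _ hlen, ih]
      simp only [List.map_cons]
      rw [pvLoopB]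
      rw [pvLoopB_acc]
      rw [pvLoopB_acc (out := _ ++ _)]
      simp [List.map_take, List.map_drop, List.map_map, Function.comp_def, List.append_assoc]

theorem pvRecurseA_eq (ol : List (Int × Int)) : ∀ (f : Nat) (idxs : List Nat), idxs.length ≤ f → ∀ pairs configs,
    pvRecurseA ol f idxs pairs configs
      = configs ++ (pvEnumB f (idxs.map (pvGetOrb ol))).map (fun t => pairs ++ t) := by
  intro f
  induction f with
  | zero =>
      intro idxs h pairs configs
      match idxs, h with
      | [], _ => simp [pvRecurseA, pvEnumB]
  | succ f ih =>
      intro idxs h pairs configs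
      match idxs with
      | [] => simp [pvRecurseA, pvEnumB]
      | first :: rest =>
          rw [pvRecurseA]
          have hr : rest.length ≤ f := by simpa using h
          rw [ih rest hr]
          rw [pvLoopA_eq ol _ _ _ _ rest _ (fun idxs hl => ih idxs (le_trans hl hr))]
          simp only [List.map_cons]
          rw [pvEnumB]
          conv_rhs => rw [pvLoopB_acc]
          simp [List.map_map, Function.comp_def, List.append_assoc]

theorem map_pvGetOrb_range (ol : List (Int × Int)) :
    (List.range ol.length).map (pvGetOrb ol) = ol := by
  apply List.ext_getElem
  · simp
  · intro i h1 h2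
    simp [pvGetOrb, List.getD_eq_getElem?_getD, List.getElem?_eq_getElem h2]

-- ===== VERDICT (by name: the statement is the Claim_ definition above) =====
theorem enumerate_size2_choices_spec : Claim_equal_enumerate_size2_choices := by
  intro ol _
  unfold Spec_enumerate_size2_choices enumerate_size2_choices enumerate_size2_choices_alt
  rw [pvRecurseA_eq ol ol.length (List.range ol.length) (by simp)]
  simp [map_pvGetOrb_range]
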